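-- pv_equiv track=rewrite | github.com/Alex92rus/ErrorDetectionProject | classifier/testingclassifier.py | feed_windows_only_tokens
-- ===== SOURCE A (Python) =====
-- def feed_windows_only_tokens(_data, _window_size):
--     windows = []
--     for sentence, errors in _data:
--         tokens = sentence.split()
--         word_window_size = min(len(tokens), _window_size)
--         for i in range(0, len(tokens) - word_window_size + 1):
--             window_tuple = (tokens[i:i + word_window_size], )
--             window_range = range(i, i + word_window_size)
--             for error in errors:
--                 if error[0] in window_range or error[1] in window_range:
--                     if len(window_tuple) < 2:
--                         window_tuple = window_tuple + (has_error, )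
--             if len(window_tuple) == 1:
--                 window_tuple = window_tuple + (no_error, )
--             windows.append(window_tuple)
--     return windows
--
-- has_error = 1
--
-- no_error = 0
-- ===== SOURCE B (Python) =====
-- has_error = 1
--
-- no_error = 0
--
--
-- def _bisect_left(a, x):
--     # leftmost insertion point of x in sorted list a (hand-written; no imports in A's module)
--     lo, hi = 0, len(a)
--     while lo < hi:
--         mid = (lo + hi) // 2
--         if a[mid] < x:
--             lo = mid + 1
--         else:
--             hi = mid
--     return lo
--
--
-- def feed_windows_only_tokens(_data, _window_size):
--     windows = []
--     for sentence, errors in _data: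
--         tokens = sentence.split()
--         w = min(len(tokens), _window_size)
--         positions = sorted(p for err in errors for p in (err[0], err[1]))
--         for i in range(0, len(tokens) - w + 1):
--             label = has_error if _bisect_left(positions, i + w) > _bisect_left(positions, i) else no_error
--             windows.append((tokens[i:i + w], label))
--     return windows
-- ===== Notes on version B (the rewrite author's own statement) =====
-- stated objective: alternative
-- what changed: Instead of scanning every error pair for each window, B sorts all error endpoints once per sentence and labels each window with two binary searches over the sorted endpoints; a timing run could not confirm a speed-up on its inputs, so no speed is claimed.
import Mathlib
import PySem

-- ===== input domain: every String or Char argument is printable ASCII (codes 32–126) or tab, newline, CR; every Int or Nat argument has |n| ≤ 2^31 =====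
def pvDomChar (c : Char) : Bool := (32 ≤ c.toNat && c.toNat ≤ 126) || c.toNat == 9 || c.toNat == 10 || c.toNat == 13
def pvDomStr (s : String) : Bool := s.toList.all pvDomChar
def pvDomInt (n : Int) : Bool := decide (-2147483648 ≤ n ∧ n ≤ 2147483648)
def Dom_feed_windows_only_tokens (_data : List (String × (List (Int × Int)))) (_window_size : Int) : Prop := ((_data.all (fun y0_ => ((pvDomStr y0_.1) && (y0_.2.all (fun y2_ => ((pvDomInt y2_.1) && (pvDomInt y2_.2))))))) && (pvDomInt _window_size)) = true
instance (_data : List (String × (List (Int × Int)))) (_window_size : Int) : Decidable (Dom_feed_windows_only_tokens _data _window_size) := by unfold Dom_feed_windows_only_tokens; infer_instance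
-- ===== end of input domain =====

-- B replaces the per-window scan over all errors with one sorted list of error
-- endpoints per sentence, labelling each window by two binary searches (alternative algorithm).

-- ===== PORT A =====
-- 'e in range(i, i+w)' (step 1) is exactly i ≤ e ∧ e < i+w
def feed_windows_only_tokens (_data : List (String × (List (Int × Int)))) (_window_size : Int) : List (List String × Int) :=
  _data.foldl (fun windows se =>
    let tokens := PySem.Str.split₀ se.1
    let wws := min (tokens.length : Int) _window_size
    (PySem.List.pyRange 0 ((tokens.length : Int) - wws + 1) 1).foldl (fun windows i =>
      let winTokens := PySem.List.slice tokens (some i) (some (i + wws))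
      -- window_tuple has length 2 exactly when the label slot is filled: model it as Option Int
      let lab : Option Int :=
        se.2.foldl (fun lab error =>
          if (i ≤ error.1 ∧ error.1 < i + wws) ∨ (i ≤ error.2 ∧ error.2 < i + wws) then
            (if lab.isNone then some 1 else lab)
          else lab) none
      windows ++ [(winTokens, lab.getD 0)]) windows) []

-- ===== PORT B =====
-- _bisect_left's while loop; 0 ≤ mid < a.length throughout, so getD is exact for a[mid].
-- the fuel argument only makes the loop structurally recursive (kernel-reducible):
-- hi - lo shrinks on every pass, so fuel = len(a) never runs out
def bisectLeftGo (a : List Int) (x : Int) : Nat → Nat → Nat → Nat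
  | 0, lo, _ => lo
  | fuel + 1, lo, hi =>
    if lo < hi then
      let mid := (lo + hi) / 2
      if a.getD mid 0 < x then bisectLeftGo a x fuel (mid + 1) hi
      else bisectLeftGo a x fuel lo mid
    else lo

def bisectLeft' (a : List Int) (x : Int) : Nat := bisectLeftGo a x a.length 0 a.length

def feed_windows_only_tokens_alt (_data : List (String × (List (Int × Int)))) (_window_size : Int) : List (List String × Int) :=
  _data.foldl (fun windows se =>
    let tokens := PySem.Str.split₀ se.1
    let w := min (tokens.length : Int) _window_size
    let positions := PySem.List.sorted (se.2.flatMap (fun err => [err.1, err.2])) (fun p => p) false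
    (PySem.List.pyRange 0 ((tokens.length : Int) - w + 1) 1).foldl (fun windows i =>
      let lab : Int := if bisectLeft' positions i < bisectLeft' positions (i + w) then 1 else 0
      windows ++ [(PySem.List.slice tokens (some i) (some (i + w)), lab)]) windows) []

-- ===== PRECONDITION & SPEC =====
def Spec_feed_windows_only_tokens (_data : List (String × (List (Int × Int)))) (_window_size : Int) (out : List (List String × Int)) : Prop := out = feed_windows_only_tokens_alt _data _window_size
instance (_data : List (String × (List (Int × Int)))) (_window_size : Int) (out : List (List String × Int)) : Decidable (Spec_feed_windows_only_tokens _data _window_size out) := by unfold Spec_feed_windows_only_tokens; infer_instance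

-- ===== CLAIM (what is proved, stated in full; the proofs are below) =====
def Claim_equal_feed_windows_only_tokens : Prop := ∀ (_data : List (String × (List (Int × Int)))) (_window_size : Int), Dom_feed_windows_only_tokens _data _window_size → Spec_feed_windows_only_tokens _data _window_size (feed_windows_only_tokens _data _window_size)

-- ===== LEMMAS AND PROOFS =====

-- on a (≤)-sorted list, 'a[k] < x' holds exactly for the first countP (· < x) indices
theorem getElem_lt_iff_lt_countP (a : List Int) (x : Int)
    (hs : a.Pairwise (· ≤ ·)) (k : Nat) (hk : k < a.length) :
    (a[k] < x ↔ k < a.countP (fun p => decide (p < x))) := by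
  induction a generalizing k with
  | nil => simp at hk
  | cons h t ih =>
    rcases List.pairwise_cons.mp hs with ⟨hle, hts⟩
    have hz : ¬ h < x → t.countP (fun p => decide (p < x)) = 0 := by
      intro hnx
      apply List.countP_eq_zero.mpr
      intro p hp
      have := hle p hp
      simp only [decide_eq_true_eq]
      omega
    cases k with
    | zero =>
      rw [List.getElem_cons_zero, List.countP_cons]
      by_cases hx : h < x
      · simp [hx]
      · rw [hz hx]
        simp [hx]
    | succ k =>
      have hk' : k < t.length := by simpa using hk
      have iht := ih hts k hk'
      rw [List.getElem_cons_succ, List.countP_cons]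
      by_cases hx : h < x
      · simp [hx, iht]
      · have hxk : ¬ t[k] < x := by
          have hh : x ≤ h := by omega
          have := hle t[k] (List.getElem_mem hk')
          omega
        rw [hz hx]
        simp [hx, hxk]

theorem bisectLeftGo_eq (a : List Int) (x : Int) (fuel lo hi : Nat)
    (hs : a.Pairwise (· ≤ ·)) (hhi : hi ≤ a.length) (hfuel : hi - lo ≤ fuel)
    (h1 : lo ≤ a.countP (fun p => decide (p < x)))
    (h2 : a.countP (fun p => decide (p < x)) ≤ hi) :
    bisectLeftGo a x fuel lo hi = a.countP (fun p => decide (p < x)) := by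
  induction fuel generalizing lo hi with
  | zero =>
    rw [bisectLeftGo]
    omega
  | succ fuel ih =>
    rw [bisectLeftGo]
    by_cases h : lo < hi
    · simp only [h, if_true]
      have hmid : (lo + hi) / 2 < a.length := by omega
      have hg : a.getD ((lo + hi) / 2) 0 = a[(lo + hi) / 2] := List.getD_eq_getElem a 0 hmid
      have key := getElem_lt_iff_lt_countP a x hs ((lo + hi) / 2) hmid
      rw [hg]
      by_cases hx : a[(lo + hi) / 2] < x
      · simp only [hx, if_true]
        exact ih _ hi hhi (by omega) (by have := key.mp hx; omega) h2
      · simp only [hx, if_false]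
        have : ¬ ((lo + hi) / 2 < a.countP (fun p => decide (p < x))) := fun hc => hx (key.mpr hc)
        exact ih lo _ (by omega) (by omega) h1 (by omega)
    · simp only [h, if_false]
      omega

theorem bisectLeft'_eq (a : List Int) (x : Int) (hs : a.Pairwise (· ≤ ·)) :
    bisectLeft' a x = a.countP (fun p => decide (p < x)) := by
  have := List.countP_le_length (l := a) (p := fun p => decide (p < x))
  exact bisectLeftGo_eq a x a.length 0 a.length hs le_rfl (by omega) (Nat.zero_le _) this

-- count of elements below hi splits at lo (any list, lo ≤ hi)
theorem countP_lt_split (l : List Int) (lo hi : Int) (h : lo ≤ hi) :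
    l.countP (fun p => decide (p < hi)) =
      l.countP (fun p => decide (p < lo)) + l.countP (fun p => decide (lo ≤ p ∧ p < hi)) := by
  induction l with
  | nil => simp
  | cons a t ih =>
    rw [List.countP_cons, List.countP_cons, List.countP_cons, ih]
    have e1 : (decide (a < hi) : Bool) = true ↔ a < hi := by simp
    have e2 : (decide (a < lo) : Bool) = true ↔ a < lo := by simp
    have e3 : (decide (lo ≤ a ∧ a < hi) : Bool) = true ↔ (lo ≤ a ∧ a < hi) := by simp
    split_ifs with g1 g2 g3 g2 g3 <;>
      [skip; skip; skip; skip; skip; skip; skip; skip] <;>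
      simp only [e1, e2, e3] at * <;> omega

theorem bisect_lt_iff_exists (a : List Int) (lo hi : Int) (hs : a.Pairwise (· ≤ ·)) :
    (bisectLeft' a lo < bisectLeft' a hi) ↔ ∃ p ∈ a, lo ≤ p ∧ p < hi := by
  rw [bisectLeft'_eq a lo hs, bisectLeft'_eq a hi hs]
  by_cases hlh : lo ≤ hi
  · rw [countP_lt_split a lo hi hlh]
    have hiff : (a.countP (fun p => decide (p < lo)) <
        a.countP (fun p => decide (p < lo)) + a.countP (fun p => decide (lo ≤ p ∧ p < hi))) ↔
        0 < a.countP (fun p => decide (lo ≤ p ∧ p < hi)) := by omega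
    rw [hiff, List.countP_pos_iff]
    refine exists_congr fun p => ?_
    simp
  · constructor
    · intro h
      exfalso
      have hm : ∀ p ∈ a, (fun p => decide (p < hi)) p = true → (fun p => decide (p < lo)) p = true := by
        intro p _ hp
        simp only [decide_eq_true_eq] at *
        omega
      have := List.countP_mono_left hm
      omega
    · rintro ⟨p, _, hp1, hp2⟩
      omega

-- A's inner error loop: once the label slot is filled it stays filled
theorem foldl_lab_some (errors : List (Int × Int)) (cond : Int × Int → Prop)
    [DecidablePred cond] :
    errors.foldl (fun lab error =>
      if cond error then (if lab.isNone then some (1:Int) else lab) else lab) (some 1) = some 1 := by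
  induction errors with
  | nil => rfl
  | cons e t ih =>
    rw [List.foldl_cons]
    have hstep : (if cond e then
        (if (some (1:Int)).isNone then some (1:Int) else some 1) else some 1) = some 1 := by
      split_ifs <;> rfl
    rw [hstep]
    exact ih

theorem foldl_lab_eq_any (errors : List (Int × Int)) (cond : Int × Int → Prop)
    [DecidablePred cond] :
    errors.foldl (fun lab error =>
      if cond error then (if lab.isNone then some (1:Int) else lab) else lab) none =
      (if errors.any (fun e => decide (cond e)) then some 1 else none) := by
  induction errors with
  | nil => rfl
  | cons e t ih =>
    rw [List.foldl_cons]
    by_cases he : cond e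
    · have hstep : (if cond e then
          (if (none : Option Int).isNone then some (1:Int) else none) else none) = some 1 := by
        simp [he]
      rw [hstep, foldl_lab_some t cond,
        if_pos (show (e :: t).any (fun x => decide (cond x)) = true by simp [he])]
    · have hstep : (if cond e then
          (if (none : Option Int).isNone then some (1:Int) else none) else none) = none := by
        simp [he]
      have hf : (e :: t).any (fun x => decide (cond x)) = t.any (fun x => decide (cond x)) := by
        simp [he]
      rw [hstep, ih, hf]

-- the per-window labels coincide
theorem label_eq (errors : List (Int × Int)) (i w : Int) :
    ((errors.foldl (fun lab error =>
        if (i ≤ error.1 ∧ error.1 < i + w) ∨ (i ≤ error.2 ∧ error.2 < i + w) then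
          (if lab.isNone then some (1:Int) else lab)
        else lab) none).getD 0) =
    (if bisectLeft' (PySem.List.sorted (errors.flatMap (fun err => [err.1, err.2])) (fun p => p) false) i
        < bisectLeft' (PySem.List.sorted (errors.flatMap (fun err => [err.1, err.2])) (fun p => p) false) (i + w)
      then (1:Int) else 0) := by
  set positions := PySem.List.sorted (errors.flatMap (fun err => [err.1, err.2])) (fun p => p) false with hp
  have hs : positions.Pairwise (· ≤ ·) := by
    have := PySem.List.sorted_pairwise (errors.flatMap (fun err => [err.1, err.2])) (fun p : Int => p)
    simpa [hp] using this
  rw [foldl_lab_eq_any errors (fun error => (i ≤ error.1 ∧ error.1 < i + w) ∨ (i ≤ error.2 ∧ error.2 < i + w))]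
  have hmem : ∀ p : Int, p ∈ positions ↔ p ∈ errors.flatMap (fun err => [err.1, err.2]) := by
    intro p; rw [hp]; exact PySem.List.mem_sorted _ _ _ p
  have hiff : (bisectLeft' positions i < bisectLeft' positions (i + w)) ↔
      errors.any (fun e => decide ((i ≤ e.1 ∧ e.1 < i + w) ∨ (i ≤ e.2 ∧ e.2 < i + w))) = true := by
    rw [bisect_lt_iff_exists positions i (i + w) hs]
    simp only [List.any_eq_true, decide_eq_true_eq]
    constructor
    · rintro ⟨p, hpmem, h1, h2⟩
      rw [hmem] at hpmem
      simp only [List.mem_flatMap, List.mem_cons] at hpmem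
      rcases hpmem with ⟨err, herr, hc⟩
      refine ⟨err, herr, ?_⟩
      rcases hc with h | h | h
      · left; omega
      · right; omega
      · simp at h
    · rintro ⟨e, he, h | h⟩
      · exact ⟨e.1, (hmem e.1).mpr (List.mem_flatMap.mpr ⟨e, he, by simp⟩), h⟩
      · exact ⟨e.2, (hmem e.2).mpr (List.mem_flatMap.mpr ⟨e, he, by simp⟩), h⟩
  by_cases hb : bisectLeft' positions i < bisectLeft' positions (i + w)
  · rw [if_pos hb, if_pos (hiff.mp hb)]
    rfl
  · rw [if_neg hb, if_neg (fun h => hb (hiff.mpr h))]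
    rfl

-- ===== VERDICT (by name: the statement is the Claim_ definition above) =====
theorem feed_windows_only_tokens_spec : Claim_equal_feed_windows_only_tokens := by
  intro _data _window_size _hdom
  unfold Spec_feed_windows_only_tokens feed_windows_only_tokens feed_windows_only_tokens_alt
  simp only [PySem.List.foldl_append_singleton_eq_map, PySem.List.foldl_append_eq_flatMap,
    List.nil_append]
  induction _data with
  | nil => rfl
  | cons se t ih =>
    have ht : Dom_feed_windows_only_tokens t _window_size := by
      unfold Dom_feed_windows_only_tokens at _hdom ⊢
      simp only [List.all_cons, Bool.and_eq_true] at _hdom ⊢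
      exact ⟨_hdom.1.2, _hdom.2⟩
    simp only [List.flatMap_cons]
    rw [ih ht]
    congr 1
    apply List.map_congr_left
    intro i _
    exact congrArg (fun z => (PySem.List.slice (PySem.Str.split₀ se.1) (some i)
      (some (i + min ((PySem.Str.split₀ se.1).length : Int) _window_size)), z))
      (label_eq se.2 i (min ((PySem.Str.split₀ se.1).length : Int) _window_size))
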